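-- pv_equiv track=rewrite | github.com/braisgg10/Fundamentos-de-la-Programacion | labs/lab09/lab9cuest.py | texto_triangular
-- ===== SOURCE A (Python) =====
-- def es_triangular (n:int) -> bool:
--     k = 1
--     var = False
--     while k <=n and not var:
--         if suma_intervalo (1,k) == n:
--             var = True
--         else:
--             k+= 1
--     return var
--
-- def suma_intervalo (a: int, b: int) -> int:
--     res = 0
--     for i in range (a,b+1):
--         res+=i
--     return res
--
-- def texto_triangular (n : int) -> list:
--     pir=[]
--     i=1
--     if es_triangular(n):
--         while suma_intervalo (1, i) <= n:
--             pir += [i * "*"]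
--             i += 1
--     return "\n".join(pir)
-- ===== SOURCE B (Python) =====
-- def texto_triangular(n: int) -> list:
--     # Single incremental pass: grow s = 1+2+...+k one step at a time,
--     # collecting the rows as we go; n is triangular iff the sum lands exactly on n.
--     rows = []
--     s = 0
--     k = 0
--     while s < n:
--         k += 1
--         s += k
--         rows.append(k * "*")
--     if s == n:
--         return "\n".join(rows)
--     return ""
-- ===== Notes on version B (the rewrite author's own statement) =====
-- stated objective: faster
-- what changed: Replaces the nested loops (membership test recomputing suma_intervalo(1,k) from scratch for every k, then a second row-building loop that recomputes the sum again each iteration) by one incremental pass that maintains the running triangular sum and collects the rows simultaneously.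
import Mathlib
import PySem

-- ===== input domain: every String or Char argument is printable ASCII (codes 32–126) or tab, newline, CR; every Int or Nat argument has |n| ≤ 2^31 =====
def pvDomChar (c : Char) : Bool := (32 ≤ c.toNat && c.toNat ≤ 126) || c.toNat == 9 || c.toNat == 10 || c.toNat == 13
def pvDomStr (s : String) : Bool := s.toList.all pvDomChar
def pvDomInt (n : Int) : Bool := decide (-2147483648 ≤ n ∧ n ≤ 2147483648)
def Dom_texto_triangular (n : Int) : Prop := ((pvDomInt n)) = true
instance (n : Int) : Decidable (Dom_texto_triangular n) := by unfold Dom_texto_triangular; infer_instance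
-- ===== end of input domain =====

-- B replaces A's nested loops (a from-scratch suma_intervalo for every candidate k, twice)
-- by one incremental pass keeping the running triangular sum; objective: faster (asymptotic).

-- ===== PORT A =====
def suma_intervalo (a b : Int) : Int :=
  (PySem.List.pyRange a (b + 1) 1).foldl (fun res i => res + i) 0

-- termination helpers for pirLoop's while-loop (cited by name in decreasing_by)
theorem foldl_add_le_of_nonneg (l : List Int) (h : ∀ x ∈ l, 0 ≤ x) :
    ∀ a : Int, a ≤ l.foldl (fun r i => r + i) a := by
  induction l with
  | nil => intro a; simp
  | cons x xs ih =>
    intro a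
    have hx : 0 ≤ x := h x (by simp)
    have h2 := ih (fun y hy => h y (by simp [hy])) (a + x)
    simp only [List.foldl_cons]
    exact le_trans (by omega) h2

theorem suma_intervalo_nonneg (j : Int) : 0 ≤ suma_intervalo 1 j := by
  unfold suma_intervalo
  refine foldl_add_le_of_nonneg _ (fun x hx => ?_) 0
  have := (PySem.List.mem_pyRange_one).1 hx
  omega

theorem suma_intervalo_succ (j : Int) (h : 0 ≤ j) :
    suma_intervalo 1 (j + 1) = suma_intervalo 1 j + (j + 1) := by
  unfold suma_intervalo
  rw [PySem.List.pyRange_one_succ_right (a := 1) (b := j + 1) (by omega), List.foldl_append]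
  simp [List.foldl]

theorem le_suma_intervalo (i : Int) (hi : 1 ≤ i) : i ≤ suma_intervalo 1 i := by
  have h1 := suma_intervalo_succ (i - 1) (by omega)
  have e2 : i - 1 + 1 = i := by ring
  rw [e2] at h1
  have h2 := suma_intervalo_nonneg (i - 1)
  omega

def esLoop (n k : Int) : Bool :=
  if _h : k ≤ n then
    if suma_intervalo 1 k == n then true else esLoop n (k + 1)
  else false
termination_by (n + 1 - k).toNat
decreasing_by omega

def es_triangular (n : Int) : Bool := esLoop n 1

def pirLoop (n : Int) (pir : List String) (i : Int) : List String :=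
  if _h : suma_intervalo 1 i ≤ n then
    pirLoop n (pir ++ [String.ofList (PySem.List.pyRepeat ['*'] i)]) (i + 1)
  else pir
termination_by (1 - i).toNat + (n + 2 - i).toNat
decreasing_by
  by_cases hi : i ≤ 0
  · omega
  · have := le_suma_intervalo i (by omega)
    omega

def texto_triangular (n : Int) : String :=
  PySem.Str.join "\n" (if es_triangular n then pirLoop n [] 1 else [])

-- ===== PORT B =====
def altLoop (n : Int) (rows : List String) (s : Int) (k : Nat) : List String × Int :=
  if _h : s < n then
    altLoop n (rows ++ [String.ofList (PySem.List.pyRepeat ['*'] ((k : Int) + 1))])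
      (s + ((k : Int) + 1)) (k + 1)
  else (rows, s)
termination_by (n - s).toNat
decreasing_by omega

def texto_triangular_alt (n : Int) : String :=
  if (altLoop n [] 0 0).2 == n then PySem.Str.join "\n" (altLoop n [] 0 0).1 else ""

-- ===== PRECONDITION & SPEC =====
def Spec_texto_triangular (n : Int) (out : String) : Prop := out = texto_triangular_alt n
instance (n : Int) (out : String) : Decidable (Spec_texto_triangular n out) := by unfold Spec_texto_triangular; infer_instance

-- ===== CLAIM (what is proved, stated in full; the proofs are below) =====
def Claim_equal_texto_triangular : Prop := ∀ (n : Int), Dom_texto_triangular n → Spec_texto_triangular n (texto_triangular n)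

-- ===== LEMMAS AND PROOFS =====

theorem suma_zero : suma_intervalo 1 (0 : Int) = 0 := by decide

theorem suma_one : suma_intervalo 1 (1 : Int) = 1 := by decide

theorem suma_succ (k : Nat) :
    suma_intervalo 1 ((k : Int) + 1) = suma_intervalo 1 (k : Int) + ((k : Int) + 1) :=
  suma_intervalo_succ (k : Int) (by omega)

theorem suma_strictMono : StrictMono (fun k : Nat => suma_intervalo 1 (k : Int)) := by
  apply strictMono_nat_of_lt_succ
  intro k
  have h := suma_succ k
  push_cast
  omega

theorem suma_mono : Monotone (fun k : Nat => suma_intervalo 1 (k : Int)) :=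
  suma_strictMono.monotone

-- the two while-loops agree step for step whenever n is a triangular number
theorem loops_agree (n : Int) (m : Nat) (hm : suma_intervalo 1 (m : Int) = n) :
    ∀ d (k : Nat) (rows : List String), k + d = m →
      pirLoop n rows ((k : Int) + 1) = (altLoop n rows (suma_intervalo 1 (k : Int)) k).1 ∧
      (altLoop n rows (suma_intervalo 1 (k : Int)) k).2 = n := by
  intro d
  induction d with
  | zero =>
    intro k rows hk
    have hkm : k = m := by omega
    subst hkm
    have h1 : ¬ suma_intervalo 1 (k : Int) < n := by omega
    have h2 : ¬ suma_intervalo 1 ((k : Int) + 1) ≤ n := by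
      have := suma_succ k
      omega
    rw [altLoop.eq_def, dif_neg h1, pirLoop.eq_def, dif_neg h2]
    exact ⟨rfl, hm⟩
  | succ d ih =>
    intro k rows hk
    have hlt : suma_intervalo 1 (k : Int) < suma_intervalo 1 (m : Int) :=
      suma_strictMono (show k < m by omega)
    have h1 : suma_intervalo 1 (k : Int) < n := by omega
    have h2 : suma_intervalo 1 ((k : Int) + 1) ≤ n := by
      have := suma_mono (show k + 1 ≤ m by omega)
      simp only at this
      push_cast at this
      omega
    rw [altLoop.eq_def, dif_pos h1, pirLoop.eq_def, dif_pos h2]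
    have hrec := ih (k + 1)
      (rows ++ [String.ofList (PySem.List.pyRepeat ['*'] ((k : Int) + 1))]) (by omega)
    push_cast at hrec
    rw [suma_succ k] at hrec
    exact hrec

-- B's final sum is always some triangular number
theorem alt_snd (n : Int) :
    ∀ (k : Nat) (rows : List String), ∃ K : Nat,
      (altLoop n rows (suma_intervalo 1 (k : Int)) k).2 = suma_intervalo 1 (K : Int) := by
  intro k
  induction hd : (n - suma_intervalo 1 (k : Int)).toNat using Nat.strong_induction_on
    generalizing k with
  | _ d ih =>
  intro rows
  by_cases h : suma_intervalo 1 (k : Int) < n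
  · rw [altLoop.eq_def, dif_pos h, ← suma_succ k]
    have hlt : (n - suma_intervalo 1 ((k : Int) + 1)).toNat < d := by
      have := suma_succ k
      omega
    have hc : suma_intervalo 1 ((k : Int) + 1) = suma_intervalo 1 (((k + 1 : Nat)) : Int) := by
      push_cast; ring_nf
    rw [hc]
    exact ih _ hlt (k + 1) rfl _
  · rw [altLoop.eq_def, dif_neg h]
    exact ⟨k, rfl⟩

-- es_triangular is sound: a true answer names a witness k with sum(1..k) = n
theorem esLoop_sound (n : Int) :
    ∀ k : Int, esLoop n k = true → ∃ j : Int, k ≤ j ∧ suma_intervalo 1 j = n := by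
  intro k
  induction hd : (n + 1 - k).toNat using Nat.strong_induction_on generalizing k with
  | _ d ih =>
  intro h
  rw [esLoop.eq_def] at h
  split_ifs at h with h1 h2
  · exact ⟨k, le_refl _, by simpa using h2⟩
  · obtain ⟨j, hj1, hj2⟩ := ih _ (by omega) (k + 1) rfl h
    exact ⟨j, by omega, hj2⟩

-- es_triangular is complete
theorem esLoop_complete (n : Int) (j : Int) (hjn : j ≤ n) (hj : suma_intervalo 1 j = n) :
    ∀ k : Int, k ≤ j → esLoop n k = true := by
  intro k
  induction hd : (j - k).toNat using Nat.strong_induction_on generalizing k with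
  | _ d ih =>
  intro hk
  rw [esLoop.eq_def, dif_pos (show k ≤ n by omega)]
  by_cases he : suma_intervalo 1 k = n
  · simp [he]
  · have hkj : k < j := by
      rcases lt_or_eq_of_le hk with h | h
      · exact h
      · exact absurd (h ▸ hj) he
    have := ih _ (by omega) (k + 1) rfl (by omega)
    simp [he, this]

theorem join_nil_str : PySem.Str.join "\n" [] = "" := by decide

-- ===== VERDICT (by name: the statement is the Claim_ definition above) =====
theorem texto_triangular_spec : Claim_equal_texto_triangular := by
  intro n _
  unfold Spec_texto_triangular texto_triangular texto_triangular_alt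
  by_cases htr : ∃ m : Nat, suma_intervalo 1 (m : Int) = n
  · obtain ⟨m, hm⟩ := htr
    obtain ⟨hfst, hsnd⟩ := loops_agree n m hm m 0 [] (by omega)
    simp only [Nat.cast_zero, zero_add, suma_zero] at hfst hsnd
    rw [hsnd]
    simp only [beq_self_eq_true, if_true, ← hfst]
    by_cases hes : es_triangular n = true
    · rw [hes, if_pos rfl]
    · rw [Bool.not_eq_true] at hes
      rw [hes]
      simp only [Bool.false_eq_true, if_false]
      -- es_triangular n = false forces n ≤ 0, so the pir loop would do nothing anyway
      have hn0 : ¬ (1 : Int) ≤ n := by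
        intro h1
        have hm1 : 1 ≤ m := by
          rcases Nat.eq_zero_or_pos m with h | h
          · subst h; simp only [Nat.cast_zero, suma_zero] at hm; omega
          · exact h
        have hmn : (m : Int) ≤ n := by
          have := le_suma_intervalo (m : Int) (by exact_mod_cast hm1)
          omega
        have htrue : esLoop n 1 = true :=
          esLoop_complete n (m : Int) hmn hm 1 (by exact_mod_cast hm1)
        rw [es_triangular, htrue] at hes
        exact absurd hes (by simp)
      rw [pirLoop.eq_def, dif_neg (by rw [suma_one]; omega)]
  · -- n is not triangular: both sides are ""
    have hes : es_triangular n = false := by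
      rcases h : es_triangular n with _ | _
      · rfl
      · exfalso
        obtain ⟨j, hj1, hj2⟩ := esLoop_sound n 1 h
        apply htr
        refine ⟨j.toNat, ?_⟩
        rwa [Int.toNat_of_nonneg (by omega)]
    rw [hes]
    simp only [Bool.false_eq_true, if_false, join_nil_str]
    obtain ⟨K, hK⟩ := alt_snd n 0 []
    simp only [Nat.cast_zero, suma_zero] at hK
    have hbeq : ((altLoop n [] 0 0).2 == n) = false := by
      simp only [beq_eq_false_iff_ne, ne_eq]
      intro hEq
      exact htr ⟨K, by rw [← hK, hEq]⟩
    rw [hbeq]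
    simp
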